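-- pv_equiv track=rewrite | github.com/bhamidipatinikhil/CN-Lab-Programs | CharacterStuffing.py | decode_msg
-- ===== SOURCE A (Python) =====
-- D = "~"
--
-- def decode_msg(stream):
--     ans = ""
--     st_pt = 0
--     end_pt = len(stream)
--     first_d_got = False
--
--     end_pt_reached=False
--     ctr = 0
--     tmp = ""
--     for i, ch in enumerate(stream):
--         if(not first_d_got):
--             if(ch==D):
--                 st_pt = i+1
--                 first_d_got = True
--         else:
--             if(ch==D):
--                 ctr += 1
--             else:
--                 if(ctr==1):
--                     end_pt = i-2
--                     end_pt_reached = True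
--                     break
--                 elif(ctr > 1):
--                     tmp = D * (ctr-1)
--                     ans = ans + tmp + ch
--                     tmp = ""
--                     ctr = 0
--                 else:
--                     ans += ch
--
--
--     return ans
-- ===== SOURCE B (Python) =====
-- D = "~"
--
-- def decode_msg(stream):
--     # Staged: tokenize once with split('~'), then walk the piece list.
--     # Run of k tildes <=> k-1 consecutive empty pieces between two pieces.
--     pieces = stream.split(D)
--     if len(pieces) == 1:          # no '~' at all: no frame
--         return ""
--     out = [pieces[1]]             # payload up to the first tilde run
--     empties = 0
--     for p in pieces[2:]:
--         if p == "":
--             empties += 1          # one more tilde in the current run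
--         else:
--             if empties == 0:      # run of exactly one tilde: frame closed
--                 break
--             out.append(D * empties + p)   # run of k tildes -> k-1 tildes + next text
--             empties = 0
--     # a trailing tilde run leaves empties > 0 and emits nothing, like A
--     return "".join(out)
-- ===== Notes on version B (the rewrite author's own statement) =====
-- stated objective: alternative
-- what changed: replaces A's per-character flag/counter state machine over the raw string by a staged approach: tokenize once with str.split('~'), then walk the resulting piece list (a run of k tildes is exactly k-1 consecutive empty pieces), collecting output pieces joined once
import Mathlib
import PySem

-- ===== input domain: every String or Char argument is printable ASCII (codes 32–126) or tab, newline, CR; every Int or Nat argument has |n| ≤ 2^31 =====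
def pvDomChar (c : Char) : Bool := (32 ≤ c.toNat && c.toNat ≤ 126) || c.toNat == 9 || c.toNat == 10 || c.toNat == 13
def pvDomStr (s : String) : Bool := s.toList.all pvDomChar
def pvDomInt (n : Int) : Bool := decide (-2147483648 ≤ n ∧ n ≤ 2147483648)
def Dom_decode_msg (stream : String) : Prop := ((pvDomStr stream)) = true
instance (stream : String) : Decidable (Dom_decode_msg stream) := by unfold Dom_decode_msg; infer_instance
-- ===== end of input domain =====

-- B replaces A's per-character flag/counter state machine by a staged decode:
-- split('~') once, then walk the piece list (k consecutive tildes = k-1 empty pieces);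
-- alternative decomposition, same asymptotic cost.


-- ===== PORT A =====
-- A's loop, char by char, with the state that affects the return value
-- (st_pt / end_pt / end_pt_reached / tmp are write-only w.r.t. the returned 'ans' and are dropped).
-- Returning 'ans' mid-recursion is the 'break'.
def decodeLoopA (cs : List Char) (ans : List Char) (first : Bool) (ctr : Nat) : List Char :=
  match cs with
  | [] => ans
  | ch :: rest =>
    if !first then
      if ch = '~' then decodeLoopA rest ans true ctr
      else decodeLoopA rest ans false ctr
    else
      if ch = '~' then decodeLoopA rest ans first (ctr + 1)
      else if ctr = 1 then ans
      else if ctr > 1 then decodeLoopA rest (ans ++ List.replicate (ctr - 1) '~' ++ [ch]) first 0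
      else decodeLoopA rest (ans ++ [ch]) first ctr

def decode_msg (stream : String) : String :=
  String.mk (decodeLoopA stream.toList [] false 0)

-- ===== PORT B =====
-- Source B's for-loop over pieces[2:]: an empty piece extends the current tilde run;
-- a nonempty piece after no empties closes the frame (break), otherwise it is emitted
-- with the run's k-1 tildes. Returning 'out' mid-recursion is the 'break'.
def tailLoopB (ps : List (List Char)) (out : List (List Char)) (empties : Nat) : List (List Char) :=
  match ps with
  | [] => out
  | p :: rest =>
    if p = [] then tailLoopB rest out (empties + 1)
    else if empties = 0 then out
    else tailLoopB rest (out ++ [List.replicate empties '~' ++ p]) 0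

-- pieces = stream.split('~'); len 1 means no '~'; else start from pieces[1], walk pieces[2:],
-- ''.join at the end
def decode_msg_alt (stream : String) : String :=
  match PySem.Chars.splitOn stream.toList ['~'] with
  | [] => ""          -- unreachable: split never returns an empty list
  | [_] => ""         -- len(pieces) == 1: no '~' in stream
  | _ :: p1 :: rest => String.mk (PySem.Chars.join [] (p1 :: tailLoopB rest [] 0))

-- ===== PRECONDITION & SPEC =====
def Spec_decode_msg (stream : String) (out : String) : Prop := out = decode_msg_alt stream
instance (stream : String) (out : String) : Decidable (Spec_decode_msg stream out) := by unfold Spec_decode_msg; infer_instance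

-- ===== CLAIM (what is proved, stated in full; the proofs are below) =====
def Claim_equal_decode_msg : Prop := ∀ (stream : String), Dom_decode_msg stream → Spec_decode_msg stream (decode_msg stream)

-- ===== LEMMAS AND PROOFS =====

-- Reference split on a single-char separator '~', in structural-recursion form.
def consHead (p : List Char) (l : List (List Char)) : List (List Char) :=
  match l with
  | [] => [p]
  | q :: qs => (p ++ q) :: qs

def mySplit : List Char → List (List Char)
  | [] => [[]]
  | c :: rest => if c = '~' then [] :: mySplit rest else consHead [c] (mySplit rest)

theorem mySplit_ne_nil (cs : List Char) : mySplit cs ≠ [] := by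
  cases cs with
  | nil => simp [mySplit]
  | cons c rest =>
    by_cases h : c = '~' <;> simp [mySplit, h]
    cases hm : mySplit rest <;> simp [consHead]

theorem splitOn_go_spec (fuel : Nat) : ∀ (l cur acc : List Char) (accs : List (List Char)),
    l.length < fuel →
    PySem.Chars.splitOn.go ['~'] fuel l cur accs = accs.reverse ++ consHead cur.reverse (mySplit l) := by
  induction fuel with
  | zero => intro l cur acc accs h; omega
  | succ n ih =>
    intro l cur acc accs h
    cases l with
    | nil => simp [PySem.Chars.splitOn.go, mySplit, consHead]
    | cons c rest =>
      by_cases hc : c = '~'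
      · have hp : List.isPrefixOf ['~'] (c :: rest) = true := by simp [List.isPrefixOf, hc]
        rw [PySem.Chars.splitOn.go]
        simp only [hp, if_true]
        have : List.drop (['~'] : List Char).length (c :: rest) = rest := by simp
        rw [this, ih rest [] acc (cur.reverse :: accs) (by simp at h; omega)]
        simp [mySplit, hc, consHead]
        cases hm : mySplit rest with
        | nil => exact absurd hm (mySplit_ne_nil rest)
        | cons q qs => simp [consHead]
      · have hp : List.isPrefixOf ['~'] (c :: rest) = false := by
          simp [List.isPrefixOf, hc]
          intro h'; exact absurd h'.symm hc
        rw [PySem.Chars.splitOn.go]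
        simp only [hp]
        rw [if_neg (by simp [hp])]
        rw [ih rest (c :: cur) acc accs (by simp at h; omega)]
        simp [mySplit, hc]
        cases hm : mySplit rest with
        | nil => exact absurd hm (mySplit_ne_nil rest)
        | cons q qs => simp [consHead]

theorem splitOn_eq_mySplit (cs : List Char) :
    PySem.Chars.splitOn cs ['~'] = mySplit cs := by
  show PySem.Chars.splitOn.go ['~'] (cs.length + 1) cs [] [] = mySplit cs
  rw [splitOn_go_spec (cs.length + 1) cs [] [] [] (by omega)]
  simp
  cases hm : mySplit cs with
  | nil => exact absurd hm (mySplit_ne_nil cs)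
  | cons q qs => simp [consHead]

-- mySplit decomposes along the first run of non-'~' chars.
theorem mySplit_decomp (cs : List Char) :
    mySplit cs = cs.takeWhile (· ≠ '~') ::
      (match cs.dropWhile (· ≠ '~') with
       | [] => ([] : List (List Char))
       | _ :: r => mySplit r) := by
  induction cs with
  | nil => simp [mySplit]
  | cons c rest ih =>
    by_cases h : c = '~'
    · simp [mySplit, h]
    · simp only [mySplit, if_neg h, ih]
      simp [List.takeWhile_cons, List.dropWhile_cons, h, consHead]

-- mySplit turns a leading run of t tildes into t empty pieces.
theorem mySplit_tildes (t : Nat) (l : List Char) :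
    mySplit (List.replicate t '~' ++ l) = List.replicate t [] ++ mySplit l := by
  induction t with
  | zero => simp
  | succ n ih => simp [List.replicate_succ, mySplit, ih]

-- Every list decomposes along its leading tilde run.
theorem takeWhile_drop_decomp (cs : List Char) :
    cs = List.replicate (cs.takeWhile (· = '~')).length '~' ++ cs.dropWhile (· = '~') := by
  induction cs with
  | nil => rfl
  | cons c rest ih =>
    by_cases h : c = '~'
    · simp only [List.takeWhile_cons, List.dropWhile_cons, h, decide_true, if_true,
        List.length_cons, List.replicate_succ, List.cons_append]
      exact congrArg _ ih
    · simp [List.takeWhile_cons, List.dropWhile_cons, h]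

-- tailLoopB's output accumulator is write-only prefix state.
theorem tailLoopB_acc (ps : List (List Char)) : ∀ (o1 o2 : List (List Char)) (e : Nat),
    tailLoopB ps (o1 ++ o2) e = o1 ++ tailLoopB ps o2 e := by
  induction ps with
  | nil => intro o1 o2 e; simp [tailLoopB]
  | cons p rest ih =>
    intro o1 o2 e
    by_cases hp : p = []
    · simp [tailLoopB, hp, ih]
    · by_cases he : e = 0
      · simp [tailLoopB, hp, he]
      · simp only [tailLoopB, if_neg hp, if_neg he]
        rw [List.append_assoc, ih]

theorem tailLoopB_acc1 (ps out : List (List Char)) (e : Nat) :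
    tailLoopB ps out e = out ++ tailLoopB ps [] e := by
  conv_lhs => rw [show out = out ++ [] by simp]
  rw [tailLoopB_acc]

-- empty pieces only bump the run counter.
theorem tailLoopB_empties (t : Nat) : ∀ (ps out : List (List Char)) (e : Nat),
    tailLoopB (List.replicate t [] ++ ps) out e = tailLoopB ps out (e + t) := by
  induction t with
  | zero => intro ps out e; simp
  | succ n ih =>
    intro ps out e
    have h1 : List.replicate (n + 1) ([] : List Char) ++ ps = [] :: (List.replicate n [] ++ ps) := by
      simp [List.replicate_succ]
    have h2 : tailLoopB ([] :: (List.replicate n [] ++ ps)) out e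
        = tailLoopB (List.replicate n [] ++ ps) out (e + 1) := by
      simp [tailLoopB]
    rw [h1, h2, ih, show e + 1 + n = e + (n + 1) by omega]

-- Phase 1: before the first '~', A only skips characters.
theorem loopA_skip (cs : List Char) (ans : List Char) :
    decodeLoopA cs ans false 0 =
      match cs.dropWhile (· ≠ '~') with
      | [] => ans
      | _ :: rest => decodeLoopA rest ans true 0 := by
  induction cs with
  | nil => simp [decodeLoopA]
  | cons ch rest ih =>
    by_cases h : ch = '~' <;> simp [decodeLoopA, h, ih]

-- A inside a '~' run: counting ctr over the rest of the run, then acting on the first non-'~'.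
theorem loopA_run (cs : List Char) : ∀ (ans : List Char) (ctr : Nat), 0 < ctr →
    decodeLoopA cs ans true ctr =
      match cs.dropWhile (· = '~') with
      | [] => ans
      | c :: rest2 =>
        if ctr + (cs.takeWhile (· = '~')).length = 1 then ans
        else decodeLoopA rest2 (ans ++ List.replicate (ctr + (cs.takeWhile (· = '~')).length - 1) '~' ++ [c]) true 0 := by
  induction cs with
  | nil => intro ans ctr _; simp [decodeLoopA]
  | cons ch rest ih =>
    intro ans ctr hctr
    by_cases h : ch = '~'
    · rw [show decodeLoopA (ch :: rest) ans true ctr = decodeLoopA rest ans true (ctr + 1) by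
        simp [decodeLoopA, h]]
      rw [ih ans (ctr + 1) (by omega)]
      simp [h]
      cases rest.dropWhile (· = '~') with
      | nil => rfl
      | cons c rest2 =>
        have h2 : ctr + ((rest.takeWhile (· = '~')).length + 1) = ctr + 1 + (rest.takeWhile (· = '~')).length := by omega
        simp [h2]
    · simp only [List.dropWhile_cons, List.takeWhile_cons, h, decide_eq_true_eq]
      simp [decodeLoopA, h]
      rcases Nat.lt_or_ge 1 ctr with h1 | h1
      · simp [show ¬ ctr = 1 by omega, h1]
      · have : ctr = 1 := by omega
        simp [this]

-- Main: from the first char after the opening '~', A's state machine produces exactly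
-- the head piece plus the flattened output of B's walk over the remaining pieces.
theorem loopA_pieces (n : Nat) : ∀ (cs : List Char), cs.length ≤ n → ∀ (ans : List Char),
    decodeLoopA cs ans true 0 =
      ans ++ (mySplit cs).headI ++ (tailLoopB (mySplit cs).tail [] 0).flatten := by
  induction n with
  | zero =>
    intro cs h ans
    have : cs = [] := by cases cs <;> simp_all
    simp [this, decodeLoopA, mySplit, tailLoopB]
  | succ n ih =>
    intro cs hlen ans
    cases cs with
    | nil => simp [decodeLoopA, mySplit, tailLoopB]
    | cons ch rest =>
      by_cases h : ch = '~'
      · -- run starts; A counts it, B sees empty pieces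
        have hA : decodeLoopA (ch :: rest) ans true 0 = decodeLoopA rest ans true 1 := by
          simp [decodeLoopA, h]
        rw [hA, loopA_run rest ans 1 (by omega)]
        have hsplit : mySplit (ch :: rest) = [] :: mySplit rest := by simp [mySplit, h]
        rw [hsplit]
        simp only [List.headI, List.tail]
        set t := (rest.takeWhile (· = '~')).length with ht
        have hrest : rest = List.replicate t '~' ++ rest.dropWhile (· = '~') := takeWhile_drop_decomp rest
        cases hd : rest.dropWhile (· = '~') with
        | nil =>
          -- trailing tilde run: A emits nothing; B's walk sees only empty pieces
          rw [hd] at hrest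
          rw [show mySplit rest = List.replicate t [] ++ mySplit ([] : List Char) by
            conv_lhs => rw [hrest]; rw [mySplit_tildes]]
          simp [mySplit, tailLoopB_empties, tailLoopB]
        | cons d rest2 =>
          rw [hd] at hrest
          have hd' : ¬ d = '~' := by
            have hne : rest.dropWhile (· = '~') ≠ [] := by rw [hd]; simp
            have := List.head_dropWhile_not (p := fun x => decide (x = '~')) (l := rest) hne
            have hhd : (rest.dropWhile (· = '~')).head hne = d := by
              simp [hd]
            rw [hhd] at this
            simpa using this
          have hsplitR : mySplit rest = List.replicate t [] ++ consHead [d] (mySplit rest2) := by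
            conv_lhs => rw [hrest]
            rw [mySplit_tildes]
            simp [mySplit, hd']
          rw [hsplitR, tailLoopB_empties]
          simp only [Nat.zero_add]
          cases hm : mySplit rest2 with
          | nil => exact absurd hm (mySplit_ne_nil rest2)
          | cons q qs =>
            simp only [hm, consHead]
            by_cases htz : t = 0
            · simp [htz, tailLoopB]
            · rw [if_neg (by omega)]
              have hlen2 : rest2.length ≤ n := by
                have : rest.length = t + (rest2.length + 1) := by
                  conv_lhs => rw [hrest]
                  simp
                simp at hlen
                omega
              rw [ih rest2 hlen2, tailLoopB]
              rw [if_neg (by simp), if_neg htz]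
              conv_rhs => rw [List.nil_append, tailLoopB_acc1]
              simp [hm, show 1 + t - 1 = t by omega]
      · -- ordinary char: both emit it into the head piece
        have hA : decodeLoopA (ch :: rest) ans true 0 = decodeLoopA rest (ans ++ [ch]) true 0 := by
          simp [decodeLoopA, h]
        rw [hA, ih rest (by simp at hlen; omega)]
        have hsplit : mySplit (ch :: rest) = consHead [ch] (mySplit rest) := by
          simp [mySplit, h]
        rw [hsplit]
        cases hm : mySplit rest with
        | nil => exact absurd hm (mySplit_ne_nil rest)
        | cons q qs => simp [consHead]

theorem flatten_intersperse_nil (l : List (List Char)) :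
    (List.intersperse ([] : List Char) l).flatten = l.flatten := by
  induction l with
  | nil => rfl
  | cons a l ih =>
    cases l with
    | nil => rfl
    | cons b m =>
      have hstep : List.intersperse ([] : List Char) (a :: b :: m)
          = a :: [] :: List.intersperse ([] : List Char) (b :: m) := rfl
      rw [hstep]
      simp only [List.flatten_cons, List.nil_append] at ih ⊢
      rw [ih]

-- ===== VERDICT (by name: the statement is the Claim_ definition above) =====
theorem decode_msg_spec : Claim_equal_decode_msg := by
  intro stream _
  unfold Spec_decode_msg decode_msg decode_msg_alt
  rw [loopA_skip, splitOn_eq_mySplit, mySplit_decomp]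
  cases h : stream.toList.dropWhile (· ≠ '~') with
  | nil => rfl
  | cons c rest =>
    simp only []
    cases hm : mySplit rest with
    | nil => exact absurd hm (mySplit_ne_nil rest)
    | cons p1 ps =>
      show String.mk (decodeLoopA rest [] true 0) = _
      rw [loopA_pieces rest.length rest le_rfl []]
      simp [hm, PySem.Chars.join, List.intercalate, flatten_intersperse_nil]
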